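-- pv_equiv track=rewrite | github.com/mdpriselac/Homegreen_st_published | analytics/db_access/coffee_data_extractor.py | _count_flavors_by_level
-- ===== SOURCE A (Python) =====
-- from typing import Dict, List, Any, Optional, Tuple
--
-- def _count_flavors_by_level(flavors: List[Dict[str, str]]) -> Dict[str, Dict[str, int]]:
--     """Count flavor occurrences at each taxonomy level"""
--     counts = {
--         'family': {},
--         'genus': {},
--         'species': {}
--     }
--
--     for flavor in flavors:
--         if 'family' in flavor and flavor['family']:
--             counts['family'][flavor['family']] = counts['family'].get(flavor['family'], 0) + 1
--         if 'genus' in flavor and flavor['genus']: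
--             counts['genus'][flavor['genus']] = counts['genus'].get(flavor['genus'], 0) + 1
--         if 'species' in flavor and flavor['species']:
--             counts['species'][flavor['species']] = counts['species'].get(flavor['species'], 0) + 1
--
--     return counts
-- ===== SOURCE B (Python) =====
-- def _count_flavors_by_level(flavors):
--     """Count flavor occurrences at each taxonomy level"""
--     counts = {}
--     for level in ('family', 'genus', 'species'):
--         vals = [f[level] for f in flavors if level in f and f[level]]
--         counts[level] = {v: vals.count(v) for v in dict.fromkeys(vals)}
--     return counts
-- ===== Notes on version B (the rewrite author's own statement) =====
-- stated objective: simpler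
-- what changed: A tallies incrementally in one pass with dict.get(...,0)+1 updates on three counters; B instead materialises the list of values per level with a comprehension, dedups it to first occurrences via dict.fromkeys, and builds the count dict by calling vals.count(v) for each distinct value - a collect/dedup/count strategy with no incremental counter.
import Mathlib
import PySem

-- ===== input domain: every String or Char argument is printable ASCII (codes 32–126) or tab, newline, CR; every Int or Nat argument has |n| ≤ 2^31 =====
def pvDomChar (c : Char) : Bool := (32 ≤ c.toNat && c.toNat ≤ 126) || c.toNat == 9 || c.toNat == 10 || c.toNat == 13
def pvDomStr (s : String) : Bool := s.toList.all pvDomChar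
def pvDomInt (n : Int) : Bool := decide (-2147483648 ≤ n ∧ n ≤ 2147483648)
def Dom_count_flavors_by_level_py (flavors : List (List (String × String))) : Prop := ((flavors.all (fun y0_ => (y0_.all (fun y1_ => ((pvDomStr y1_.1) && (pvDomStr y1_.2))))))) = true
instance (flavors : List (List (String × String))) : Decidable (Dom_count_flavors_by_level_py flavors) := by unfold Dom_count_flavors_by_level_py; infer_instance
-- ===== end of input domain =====

-- ===== PORT A =====
-- B replaces A's one-pass incremental counters by a per-level collect / dedup / count-each-distinct-value build (objective: simpler).
-- 'level in flavor and flavor[level]' on the association-list dict: first-matching value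
def pvLookup (fl : List (String × String)) (k : String) : Option String :=
  (fl.find? (fun p => p.1 == k)).map (·.2)

-- one 'if <lvl> in flavor and flavor[<lvl>]: counts[<lvl>][v] = counts[<lvl>].get(v,0)+1' line of A
def pvBumpA (c : PySem.Dict String (PySem.Dict String Int)) (lvl : String)
    (fl : List (String × String)) : PySem.Dict String (PySem.Dict String Int) :=
  match pvLookup fl lvl with
  | some v =>
    if v ≠ "" then
      let d := c.getD lvl PySem.Dict.empty
      c.insert lvl (d.insert v (d.getD v 0 + 1))
    else c
  | none => c

def count_flavors_by_level_py (flavors : List (List (String × String))) :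
    List (String × List (String × Int)) :=
  let counts : PySem.Dict String (PySem.Dict String Int) :=
    PySem.Dict.ofList [("family", PySem.Dict.empty), ("genus", PySem.Dict.empty), ("species", PySem.Dict.empty)]
  let counts := flavors.foldl (fun c fl =>
    let c := pvBumpA c "family" fl
    let c := pvBumpA c "genus" fl
    pvBumpA c "species" fl) counts
  counts.items.map (fun p => (p.1, p.2.items))

-- ===== PORT B =====
-- '[f[level] for f in flavors if level in f and f[level]]'
def pvVals (flavors : List (List (String × String))) (lvl : String) : List String :=
  flavors.filterMap (fun fl =>
    match pvLookup fl lvl with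
    | some v => if v ≠ "" then some v else none
    | none => none)

-- '{v: vals.count(v) for v in dict.fromkeys(vals)}'
def pvLevelDict (flavors : List (List (String × String))) (lvl : String) : PySem.Dict String Int :=
  let vals := pvVals flavors lvl
  (PySem.List.dedup vals).foldl (fun d v => d.insert v ((vals.count v : Int))) PySem.Dict.empty

def count_flavors_by_level_py_alt (flavors : List (List (String × String))) :
    List (String × List (String × Int)) :=
  let counts : PySem.Dict String (PySem.Dict String Int) :=
    ["family", "genus", "species"].foldl (fun c lvl =>
      c.insert lvl (pvLevelDict flavors lvl)) PySem.Dict.empty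
  counts.items.map (fun p => (p.1, p.2.items))

-- ===== PRECONDITION & SPEC =====
def Spec_count_flavors_by_level_py (flavors : List (List (String × String))) (out : List (String × List (String × Int))) : Prop := out = count_flavors_by_level_py_alt flavors
instance (flavors : List (List (String × String))) (out : List (String × List (String × Int))) : Decidable (Spec_count_flavors_by_level_py flavors out) := by unfold Spec_count_flavors_by_level_py; infer_instance

-- ===== CLAIM (what is proved, stated in full; the proofs are below) =====
def Claim_equal_count_flavors_by_level_py : Prop := ∀ (flavors : List (List (String × String))), Dom_count_flavors_by_level_py flavors → Spec_count_flavors_by_level_py flavors (count_flavors_by_level_py flavors)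

-- ===== LEMMAS AND PROOFS =====

-- one guarded counting step of A at a single level (used only in the proofs, to name A's per-level action)
def pvStepA (lvl : String) (d : PySem.Dict String Int) (fl : List (String × String)) :
    PySem.Dict String Int :=
  match pvLookup fl lvl with
  | some v => if v ≠ "" then d.insert v (d.getD v 0 + 1) else d
  | none => d

-- reading / overwriting one slot of the canonical three-key outer state
theorem pvMk3_getD_family {ν : Type} (f g s d0 : ν) :
    (PySem.Dict.mk [("family", f), ("genus", g), ("species", s)]).getD "family" d0 = f := by
  rw [PySem.Dict.getD_eq_get?_getD, PySem.Dict.get?_mk_cons]; simp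

theorem pvMk3_getD_genus {ν : Type} (f g s d0 : ν) :
    (PySem.Dict.mk [("family", f), ("genus", g), ("species", s)]).getD "genus" d0 = g := by
  rw [PySem.Dict.getD_eq_get?_getD, PySem.Dict.get?_mk_cons, PySem.Dict.get?_mk_cons]; simp

theorem pvMk3_getD_species {ν : Type} (f g s d0 : ν) :
    (PySem.Dict.mk [("family", f), ("genus", g), ("species", s)]).getD "species" d0 = s := by
  rw [PySem.Dict.getD_eq_get?_getD, PySem.Dict.get?_mk_cons, PySem.Dict.get?_mk_cons,
    PySem.Dict.get?_mk_cons]; simp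

theorem pvMk3_insert_family {ν : Type} (f g s x : ν) :
    (PySem.Dict.mk [("family", f), ("genus", g), ("species", s)]).insert "family" x
    = PySem.Dict.mk [("family", x), ("genus", g), ("species", s)] := by
  apply PySem.Dict.ext; rw [PySem.Dict.items_insert]; simp

theorem pvMk3_insert_genus {ν : Type} (f g s x : ν) :
    (PySem.Dict.mk [("family", f), ("genus", g), ("species", s)]).insert "genus" x
    = PySem.Dict.mk [("family", f), ("genus", x), ("species", s)] := by
  apply PySem.Dict.ext; rw [PySem.Dict.items_insert]; simp

theorem pvMk3_insert_species {ν : Type} (f g s x : ν) :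
    (PySem.Dict.mk [("family", f), ("genus", g), ("species", s)]).insert "species" x
    = PySem.Dict.mk [("family", f), ("genus", g), ("species", x)] := by
  apply PySem.Dict.ext; rw [PySem.Dict.items_insert]; simp

-- one guarded update line of A acts on exactly one slot
theorem pvBump_family (f g s : PySem.Dict String Int) (fl : List (String × String)) :
    pvBumpA (PySem.Dict.mk [("family", f), ("genus", g), ("species", s)]) "family" fl
    = PySem.Dict.mk [("family", pvStepA "family" f fl), ("genus", g), ("species", s)] := by
  unfold pvBumpA pvStepA
  cases pvLookup fl "family" with
  | none => rfl
  | some v =>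
    dsimp only
    split_ifs with hv
    · rw [pvMk3_getD_family, pvMk3_insert_family]
    · rfl

theorem pvBump_genus (f g s : PySem.Dict String Int) (fl : List (String × String)) :
    pvBumpA (PySem.Dict.mk [("family", f), ("genus", g), ("species", s)]) "genus" fl
    = PySem.Dict.mk [("family", f), ("genus", pvStepA "genus" g fl), ("species", s)] := by
  unfold pvBumpA pvStepA
  cases pvLookup fl "genus" with
  | none => rfl
  | some v =>
    dsimp only
    split_ifs with hv
    · rw [pvMk3_getD_genus, pvMk3_insert_genus]
    · rfl

theorem pvBump_species (f g s : PySem.Dict String Int) (fl : List (String × String)) :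
    pvBumpA (PySem.Dict.mk [("family", f), ("genus", g), ("species", s)]) "species" fl
    = PySem.Dict.mk [("family", f), ("genus", g), ("species", pvStepA "species" s fl)] := by
  unfold pvBumpA pvStepA
  cases pvLookup fl "species" with
  | none => rfl
  | some v =>
    dsimp only
    split_ifs with hv
    · rw [pvMk3_getD_species, pvMk3_insert_species]
    · rfl

-- A's single combined fold from the canonical state = three independent per-level folds
theorem pvFoldA (flavors : List (List (String × String))) (f g s : PySem.Dict String Int) :
    flavors.foldl (fun c fl =>
        let c := pvBumpA c "family" fl
        let c := pvBumpA c "genus" fl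
        pvBumpA c "species" fl)
      (PySem.Dict.mk [("family", f), ("genus", g), ("species", s)])
    = PySem.Dict.mk [("family", flavors.foldl (pvStepA "family") f),
        ("genus", flavors.foldl (pvStepA "genus") g),
        ("species", flavors.foldl (pvStepA "species") s)] := by
  induction flavors generalizing f g s with
  | nil => rfl
  | cons fl rest ih =>
    simp only [List.foldl_cons]
    rw [pvBump_family, pvBump_genus, pvBump_species, ih]

-- A's guarded per-level fold over the flavors = the counter fold over the filtered value list
theorem pvStepA_filterMap (flavors : List (List (String × String))) (lvl : String)
    (d : PySem.Dict String Int) :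
    flavors.foldl (pvStepA lvl) d
    = (pvVals flavors lvl).foldl (fun d x => d.insert x (d.getD x 0 + 1)) d := by
  induction flavors generalizing d with
  | nil => rfl
  | cons fl rest ih =>
    simp only [List.foldl_cons, pvVals, List.filterMap_cons]
    unfold pvStepA
    cases pvLookup fl lvl with
    | none => exact ih d
    | some v =>
      dsimp only
      split_ifs with hv
      · simp only [List.foldl_cons]; exact ih _
      · exact ih d

-- each of A's per-level counters equals B's collect / dedup / count dict
theorem pvLevel_eq (flavors : List (List (String × String))) (lvl : String) :
    flavors.foldl (pvStepA lvl) PySem.Dict.empty = pvLevelDict flavors lvl := by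
  rw [pvStepA_filterMap, PySem.Dict.foldl_insert_getD_add_one_eq_counter]
  unfold pvLevelDict
  apply PySem.Dict.ext
  dsimp only
  rw [PySem.Dict.items_counter,
    PySem.List.dedup_eq_ofList,
    PySem.Dict.items_foldl_insert_fresh (PySem.Set.ofList (pvVals flavors lvl))
      (fun v => v) (fun v => ((pvVals flavors lvl).count v : Int)) PySem.Dict.empty
      (fun a _ => PySem.Dict.contains_empty a)
      (by simp)]
  simp [PySem.Dict.empty]

-- B's outer loop over the three level names builds exactly the canonical three-key dict
theorem pvB_outer {ν : Type} (h : String → ν) :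
    ["family", "genus", "species"].foldl (fun c lvl => c.insert lvl (h lvl)) PySem.Dict.empty
    = PySem.Dict.mk [("family", h "family"), ("genus", h "genus"), ("species", h "species")] := by
  simp only [List.foldl_cons, List.foldl_nil]
  apply PySem.Dict.ext
  simp [PySem.Dict.items_insert, PySem.Dict.contains, PySem.Dict.empty]

-- ===== VERDICT (by name: the statement is the Claim_ definition above) =====
theorem count_flavors_by_level_py_spec : Claim_equal_count_flavors_by_level_py := by
  intro flavors _
  unfold Spec_count_flavors_by_level_py count_flavors_by_level_py count_flavors_by_level_py_alt
  dsimp only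
  rw [show (PySem.Dict.ofList [("family", (PySem.Dict.empty : PySem.Dict String Int)),
        ("genus", PySem.Dict.empty), ("species", PySem.Dict.empty)])
      = PySem.Dict.mk [("family", PySem.Dict.empty), ("genus", PySem.Dict.empty),
        ("species", PySem.Dict.empty)] from by decide]
  rw [pvFoldA, pvB_outer (fun lvl => pvLevelDict flavors lvl),
    pvLevel_eq, pvLevel_eq, pvLevel_eq]
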